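-- pv_equiv track=rewrite | github.com/lindseyzh/Music-and-Mathematics | music_gen/main.py | get_pitch_list
-- ===== SOURCE A (Python) =====
-- def get_pitch_list(first_group: int, last_group: int):
--     pitch_list = []
--     for i in range(first_group, last_group + 1):
--         pitch_list.append('C' + str(i))
--         pitch_list.append('C' + str(i) + '#')
--         pitch_list.append('D' + str(i))
--         pitch_list.append('D' + str(i) + '#')
--         pitch_list.append('E' + str(i))
--         pitch_list.append('F' + str(i))
--         pitch_list.append('F' + str(i) + '#')
--         pitch_list.append('G' + str(i))
--         pitch_list.append('G' + str(i) + '#')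
--         pitch_list.append('A' + str(i))
--         pitch_list.append('A' + str(i) + '#')
--         pitch_list.append('B' + str(i))
--     return pitch_list
-- ===== SOURCE B (Python) =====
-- # Chromatic-index reimplementation: one flat loop over absolute semitone
-- # numbers; octave and pitch class recovered by // and % 12, and the octave
-- # digit is spliced into the chromatic name between letter and sharp.
-- NAMES = ('C', 'C#', 'D', 'D#', 'E', 'F', 'F#', 'G', 'G#', 'A', 'A#', 'B')
--
-- def get_pitch_list(first_group: int, last_group: int):
--     total = 12 * (last_group - first_group + 1)
--     out = []
--     for k in range(total):
--         octave, step = k // 12, k % 12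
--         name = NAMES[step]
--         out.append(name[:1] + str(first_group + octave) + name[1:])
--     return out
-- ===== Notes on version B (the rewrite author's own statement) =====
-- stated objective: alternative
-- what changed: Replaced the per-octave loop of 12 unrolled appends with a single flat loop over absolute semitone indices: octave and pitch class are recovered with k//12 and k%12 from a chromatic 12-name table, and the octave digit is spliced into the name between letter and sharp.
import Mathlib
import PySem

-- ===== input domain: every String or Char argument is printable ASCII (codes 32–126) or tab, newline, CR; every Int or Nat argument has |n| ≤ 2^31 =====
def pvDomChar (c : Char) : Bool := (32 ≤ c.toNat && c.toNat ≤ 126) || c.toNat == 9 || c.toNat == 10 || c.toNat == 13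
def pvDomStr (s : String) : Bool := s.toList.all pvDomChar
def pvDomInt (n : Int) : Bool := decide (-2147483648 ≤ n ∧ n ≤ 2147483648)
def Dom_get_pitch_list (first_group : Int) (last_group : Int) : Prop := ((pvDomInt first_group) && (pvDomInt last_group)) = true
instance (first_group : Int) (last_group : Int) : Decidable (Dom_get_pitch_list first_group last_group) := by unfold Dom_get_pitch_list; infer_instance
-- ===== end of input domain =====

-- B replaces A's per-octave block of 12 unrolled appends by one flat loop over
-- absolute semitone indices (octave = k//12, pitch class = k%12 into a chromatic
-- table, octave digit spliced into the name); same cost, different algorithm.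

-- ===== PORT A =====
def get_pitch_list (first_group : Int) (last_group : Int) : List String :=
  (PySem.List.pyRange first_group (last_group + 1) 1).foldl (fun pitch_list i =>
    pitch_list
      ++ ["C" ++ PySem.Int.toStr i]
      ++ ["C" ++ PySem.Int.toStr i ++ "#"]
      ++ ["D" ++ PySem.Int.toStr i]
      ++ ["D" ++ PySem.Int.toStr i ++ "#"]
      ++ ["E" ++ PySem.Int.toStr i]
      ++ ["F" ++ PySem.Int.toStr i]
      ++ ["F" ++ PySem.Int.toStr i ++ "#"]
      ++ ["G" ++ PySem.Int.toStr i]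
      ++ ["G" ++ PySem.Int.toStr i ++ "#"]
      ++ ["A" ++ PySem.Int.toStr i]
      ++ ["A" ++ PySem.Int.toStr i ++ "#"]
      ++ ["B" ++ PySem.Int.toStr i]) []

-- ===== PORT B =====
-- chromatic name table (Source B's NAMES)
def pvNames : List String :=
  ["C", "C#", "D", "D#", "E", "F", "F#", "G", "G#", "A", "A#", "B"]

def get_pitch_list_alt (first_group : Int) (last_group : Int) : List String :=
  let total : Int := 12 * (last_group - first_group + 1)
  (PySem.List.pyRange 0 total 1).foldl (fun out k =>
    let octave := PySem.Int.floordiv k 12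
    let step := PySem.Int.mod k 12
    -- NAMES[step]: step is always in range, so the "" default never fires
    let name := PySem.List.pyGetD pvNames step ""
    out ++ [PySem.Str.slice name none (some 1)
              ++ PySem.Int.toStr (first_group + octave)
              ++ PySem.Str.slice name (some 1) none]) []

-- ===== PRECONDITION & SPEC =====
def Spec_get_pitch_list (first_group : Int) (last_group : Int) (out : List String) : Prop := out = get_pitch_list_alt first_group last_group
instance (first_group : Int) (last_group : Int) (out : List String) : Decidable (Spec_get_pitch_list first_group last_group out) := by unfold Spec_get_pitch_list; infer_instance

-- ===== CLAIM (what is proved, stated in full; the proofs are below) =====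
def Claim_equal_get_pitch_list : Prop := ∀ (first_group : Int) (last_group : Int), Dom_get_pitch_list first_group last_group → Spec_get_pitch_list first_group last_group (get_pitch_list first_group last_group)

-- ===== LEMMAS AND PROOFS =====

-- A's per-octave block, as a flatMap body
def pvBlock (i : Int) : List String :=
  ["C" ++ PySem.Int.toStr i, "C" ++ PySem.Int.toStr i ++ "#",
   "D" ++ PySem.Int.toStr i, "D" ++ PySem.Int.toStr i ++ "#",
   "E" ++ PySem.Int.toStr i,
   "F" ++ PySem.Int.toStr i, "F" ++ PySem.Int.toStr i ++ "#",
   "G" ++ PySem.Int.toStr i, "G" ++ PySem.Int.toStr i ++ "#",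
   "A" ++ PySem.Int.toStr i, "A" ++ PySem.Int.toStr i ++ "#",
   "B" ++ PySem.Int.toStr i]

-- B's per-semitone entry
def pvEntry (first_group : Int) (k : Int) : String :=
  PySem.Str.slice (PySem.List.pyGetD pvNames (PySem.Int.mod k 12) "") none (some 1)
    ++ PySem.Int.toStr (first_group + PySem.Int.floordiv k 12)
    ++ PySem.Str.slice (PySem.List.pyGetD pvNames (PySem.Int.mod k 12) "") (some 1) none

theorem pvA_eq_flatMap (fg lg : Int) :
    get_pitch_list fg lg = (PySem.List.pyRange fg (lg + 1) 1).flatMap pvBlock := by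
  unfold get_pitch_list
  have := PySem.List.foldl_append_eq_flatMap (l := PySem.List.pyRange fg (lg + 1) 1)
    (g := pvBlock) (acc := ([] : List String))
  simpa [pvBlock] using this

theorem pvB_eq_map (fg lg : Int) :
    get_pitch_list_alt fg lg
      = (PySem.List.pyRange 0 (12 * (lg - fg + 1)) 1).map (pvEntry fg) := by
  unfold get_pitch_list_alt
  have := PySem.List.foldl_append_singleton_eq_map
    (l := PySem.List.pyRange 0 (12 * (lg - fg + 1)) 1)
    (f := pvEntry fg) (acc := ([] : List String))
  simpa [pvEntry] using this

-- pyRange c (c+12) expanded to its 12 elements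
theorem pvRange12 (c : Int) :
    PySem.List.pyRange c (c + 12) 1
      = [c, c + 1, c + 2, c + 3, c + 4, c + 5, c + 6, c + 7, c + 8, c + 9, c + 10, c + 11] := by
  have e0 : PySem.List.pyRange (c) (c + 12) 1 = (c) :: PySem.List.pyRange (c + 1) (c + 12) 1 :=
    PySem.List.pyRange_one_cons (by omega)
  have e1 : PySem.List.pyRange (c + 1) (c + 12) 1 = (c + 1) :: PySem.List.pyRange (c + 2) (c + 12) 1 := by
    rw [PySem.List.pyRange_one_cons (by omega), show c + 1 + 1 = c + 2 from by ring]
  have e2 : PySem.List.pyRange (c + 2) (c + 12) 1 = (c + 2) :: PySem.List.pyRange (c + 3) (c + 12) 1 := by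
    rw [PySem.List.pyRange_one_cons (by omega), show c + 2 + 1 = c + 3 from by ring]
  have e3 : PySem.List.pyRange (c + 3) (c + 12) 1 = (c + 3) :: PySem.List.pyRange (c + 4) (c + 12) 1 := by
    rw [PySem.List.pyRange_one_cons (by omega), show c + 3 + 1 = c + 4 from by ring]
  have e4 : PySem.List.pyRange (c + 4) (c + 12) 1 = (c + 4) :: PySem.List.pyRange (c + 5) (c + 12) 1 := by
    rw [PySem.List.pyRange_one_cons (by omega), show c + 4 + 1 = c + 5 from by ring]
  have e5 : PySem.List.pyRange (c + 5) (c + 12) 1 = (c + 5) :: PySem.List.pyRange (c + 6) (c + 12) 1 := by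
    rw [PySem.List.pyRange_one_cons (by omega), show c + 5 + 1 = c + 6 from by ring]
  have e6 : PySem.List.pyRange (c + 6) (c + 12) 1 = (c + 6) :: PySem.List.pyRange (c + 7) (c + 12) 1 := by
    rw [PySem.List.pyRange_one_cons (by omega), show c + 6 + 1 = c + 7 from by ring]
  have e7 : PySem.List.pyRange (c + 7) (c + 12) 1 = (c + 7) :: PySem.List.pyRange (c + 8) (c + 12) 1 := by
    rw [PySem.List.pyRange_one_cons (by omega), show c + 7 + 1 = c + 8 from by ring]
  have e8 : PySem.List.pyRange (c + 8) (c + 12) 1 = (c + 8) :: PySem.List.pyRange (c + 9) (c + 12) 1 := by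
    rw [PySem.List.pyRange_one_cons (by omega), show c + 8 + 1 = c + 9 from by ring]
  have e9 : PySem.List.pyRange (c + 9) (c + 12) 1 = (c + 9) :: PySem.List.pyRange (c + 10) (c + 12) 1 := by
    rw [PySem.List.pyRange_one_cons (by omega), show c + 9 + 1 = c + 10 from by ring]
  have e10 : PySem.List.pyRange (c + 10) (c + 12) 1 = (c + 10) :: PySem.List.pyRange (c + 11) (c + 12) 1 := by
    rw [PySem.List.pyRange_one_cons (by omega), show c + 10 + 1 = c + 11 from by ring]
  have e11 : PySem.List.pyRange (c + 11) (c + 12) 1 = (c + 11) :: PySem.List.pyRange (c + 12) (c + 12) 1 := by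
    rw [PySem.List.pyRange_one_cons (by omega), show c + 11 + 1 = c + 12 from by ring]
  have enil : PySem.List.pyRange (c + 12) (c + 12) 1 = [] :=
    PySem.List.pyRange_one_eq_nil (by omega)
  rw [e0, e1, e2, e3, e4, e5, e6, e7, e8, e9, e10, e11, enil]

-- B's entry at semitone 12*M + t, t = 1..11
theorem pvEntry_char (fg : Int) (M : Nat) (t : Int) (h0 : 0 ≤ t) (h12 : t < 12)
    (pre suf : String)
    (hpre : PySem.Str.slice (PySem.List.pyGetD pvNames t "") none (some 1) = pre)
    (hsuf : PySem.Str.slice (PySem.List.pyGetD pvNames t "") (some 1) none = suf) :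
    pvEntry fg (((12 * M : Nat) : Int) + t) = pre ++ PySem.Int.toStr (fg + M) ++ suf := by
  unfold pvEntry
  have hd : PySem.Int.floordiv (((12 * M : Nat) : Int) + t) 12 = (M : Int) := by
    rw [PySem.Int.floordiv_eq_ediv_of_pos (by norm_num)]; omega
  have hm : PySem.Int.mod (((12 * M : Nat) : Int) + t) 12 = t := by
    rw [PySem.Int.mod_eq_emod_of_pos (by norm_num)]; omega
  rw [hd, hm, hpre, hsuf]

-- B's entry at semitone 12*M (t = 0)
theorem pvEntry_char0 (fg : Int) (M : Nat) (pre suf : String)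
    (hpre : PySem.Str.slice (PySem.List.pyGetD pvNames 0 "") none (some 1) = pre)
    (hsuf : PySem.Str.slice (PySem.List.pyGetD pvNames 0 "") (some 1) none = suf) :
    pvEntry fg ((12 * M : Nat) : Int) = pre ++ PySem.Int.toStr (fg + M) ++ suf := by
  unfold pvEntry
  have hd : PySem.Int.floordiv ((12 * M : Nat) : Int) 12 = (M : Int) := by
    rw [PySem.Int.floordiv_eq_ediv_of_pos (by norm_num)]; omega
  have hm : PySem.Int.mod ((12 * M : Nat) : Int) 12 = (0 : Int) := by
    rw [PySem.Int.mod_eq_emod_of_pos (by norm_num)]; omega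
  rw [hd, hm, hpre, hsuf]

-- B's 12 entries of one octave are exactly A's block for that octave
theorem pvEntry_octave (fg : Int) (M : Nat) :
    (PySem.List.pyRange ((12 * M : Nat) : Int) (((12 * M : Nat) : Int) + 12) 1).map (pvEntry fg)
      = pvBlock (fg + M) := by
  rw [pvRange12]
  simp only [List.map_cons, List.map_nil]
  rw [pvEntry_char0 fg M "C" "" rfl rfl,
      pvEntry_char fg M 1 (by norm_num) (by norm_num) "C" "#" rfl rfl,
      pvEntry_char fg M 2 (by norm_num) (by norm_num) "D" "" rfl rfl,
      pvEntry_char fg M 3 (by norm_num) (by norm_num) "D" "#" rfl rfl,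
      pvEntry_char fg M 4 (by norm_num) (by norm_num) "E" "" rfl rfl,
      pvEntry_char fg M 5 (by norm_num) (by norm_num) "F" "" rfl rfl,
      pvEntry_char fg M 6 (by norm_num) (by norm_num) "F" "#" rfl rfl,
      pvEntry_char fg M 7 (by norm_num) (by norm_num) "G" "" rfl rfl,
      pvEntry_char fg M 8 (by norm_num) (by norm_num) "G" "#" rfl rfl,
      pvEntry_char fg M 9 (by norm_num) (by norm_num) "A" "" rfl rfl,
      pvEntry_char fg M 10 (by norm_num) (by norm_num) "A" "#" rfl rfl,
      pvEntry_char fg M 11 (by norm_num) (by norm_num) "B" "" rfl rfl]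
  simp [pvBlock]

-- the core equality, by induction on the number of octaves
theorem pvMain (fg : Int) (M : Nat) :
    (PySem.List.pyRange fg (fg + M) 1).flatMap pvBlock
      = (PySem.List.pyRange 0 ((12 * M : Nat) : Int) 1).map (pvEntry fg) := by
  induction M with
  | zero => simp [PySem.List.pyRange_one_eq_nil]
  | succ m ih =>
    have hstep : PySem.List.pyRange fg (fg + (m + 1 : Nat)) 1
        = PySem.List.pyRange fg (fg + m) 1 ++ [fg + m] := by
      have h := PySem.List.pyRange_one_succ_right (a := fg) (b := fg + m) (by omega)
      have hc : fg + ((m + 1 : Nat) : Int) = (fg + m) + 1 := by push_cast; ring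
      rw [hc, h]
    have hsplit : PySem.List.pyRange 0 ((12 * (m + 1) : Nat) : Int) 1
        = PySem.List.pyRange 0 ((12 * m : Nat) : Int) 1
          ++ PySem.List.pyRange ((12 * m : Nat) : Int) (((12 * m : Nat) : Int) + 12) 1 := by
      have hb : ((12 * (m + 1) : Nat) : Int) = ((12 * m : Nat) : Int) + 12 := by
        push_cast; ring
      rw [hb]
      exact PySem.List.pyRange_one_append 0 ((12 * m : Nat) : Int)
        (((12 * m : Nat) : Int) + 12) (by omega) (by omega)
    rw [hstep, hsplit, List.flatMap_append, List.map_append, ih, pvEntry_octave]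
    simp

-- ===== VERDICT (by name: the statement is the Claim_ definition above) =====
theorem get_pitch_list_spec : Claim_equal_get_pitch_list := by
  intro fg lg _
  unfold Spec_get_pitch_list
  rw [pvA_eq_flatMap, pvB_eq_map]
  by_cases h : fg ≤ lg + 1
  . have hM : lg + 1 = fg + ((lg + 1 - fg).toNat : Int) := by omega
    have hn : 12 * (lg - fg + 1) = ((12 * (lg + 1 - fg).toNat : Nat) : Int) := by
      push_cast; omega
    rw [hM, hn]
    exact pvMain fg (lg + 1 - fg).toNat
  . have h1 : PySem.List.pyRange fg (lg + 1) 1 = [] :=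
      PySem.List.pyRange_one_eq_nil (by omega)
    have h2 : PySem.List.pyRange 0 (12 * (lg - fg + 1)) 1 = [] :=
      PySem.List.pyRange_one_eq_nil (by omega)
    rw [h1, h2]
    rfl
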